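-- pv_equiv track=rewrite | github.com/lisyarus/chembook | code/hgto.py | _hermite_coeffs
-- ===== SOURCE A (Python) =====
-- def _hermite_coeffs(deg):
--     if deg == 0:
--         return [1]
--
--     if deg == 1:
--         return [0, 2]
--
--     c  = [0] + _hermite_coeffs(deg - 1)
--     cc = _hermite_coeffs(deg - 2) + [0, 0]
--
--     return list(2*(a - (deg-1)*b) for (a,b) in zip(c, cc))
-- ===== SOURCE B (Python) =====
-- def _hermite_coeffs(deg):
--     prev, cur = [1], [0, 2]
--     if deg == 0:
--         return prev
--     for n in range(2, deg + 1):
--         prev, cur = cur, [2 * (a - (n - 1) * b) for a, b in zip([0] + cur, prev + [0, 0])]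
--     return cur
-- ===== Notes on version B (the rewrite author's own statement) =====
-- stated objective: faster
-- what changed: replaces the doubly-recursive descent (exponentially many calls) by an iterative bottom-up loop keeping only the last two coefficient lists; intended as asymptotically faster — in a timing run A timed out at n=16 where B returned, so no ratio was measurable
import Mathlib
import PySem

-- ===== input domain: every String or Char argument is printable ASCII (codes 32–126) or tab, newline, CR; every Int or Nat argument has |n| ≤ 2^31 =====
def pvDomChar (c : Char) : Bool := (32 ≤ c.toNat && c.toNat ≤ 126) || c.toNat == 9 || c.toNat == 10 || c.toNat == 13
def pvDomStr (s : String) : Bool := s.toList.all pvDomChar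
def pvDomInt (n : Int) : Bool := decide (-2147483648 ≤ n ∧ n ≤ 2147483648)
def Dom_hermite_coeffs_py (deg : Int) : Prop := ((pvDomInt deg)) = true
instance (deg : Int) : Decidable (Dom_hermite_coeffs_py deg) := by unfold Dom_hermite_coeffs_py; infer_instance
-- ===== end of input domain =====

-- B replaces A's doubly-recursive descent by an iterative bottom-up loop keeping only the
-- last two coefficient lists (intended as asymptotically faster; in a timing run A timed
-- out at n=16 where B returned, so no ratio was measurable); return values agree on Pre_.

-- ===== PORT A =====
-- A recurses on deg-1 and deg-2; for deg < 0 the Python recursion never terminates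
-- (excluded by Pre_), so the Lean port recurses on deg.toNat.
def hermAux : Nat → List Int
  | 0 => [1]
  | 1 => [0, 2]
  | (n + 2) =>
      let c := 0 :: hermAux (n + 1)
      let cc := hermAux n ++ [0, 0]
      List.zipWith (fun a b => 2 * (a - ((n : Int) + 1) * b)) c cc

def hermite_coeffs_py (deg : Int) : List Int := hermAux deg.toNat

-- ===== PORT B =====
def hermite_coeffs_py_alt (deg : Int) : List Int :=
  let init : List Int × List Int := ([1], [0, 2])
  if deg == 0 then init.1
  else
    ((PySem.List.pyRange 2 (deg + 1) 1).foldl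
      (fun (st : List Int × List Int) n =>
        (st.2, List.zipWith (fun a b => 2 * (a - (n - 1) * b)) (0 :: st.2) (st.1 ++ [0, 0])))
      init).2

-- ===== PRECONDITION & SPEC =====
-- Pre_ excludes deg < 0, on which Python A recurses without a base case (RecursionError).
def Pre_hermite_coeffs_py (deg : Int) : Prop := 0 ≤ deg
instance (deg : Int) : Decidable (Pre_hermite_coeffs_py deg) := by unfold Pre_hermite_coeffs_py; infer_instance
def pvWitness_hermite_coeffs_py : Int := (3)

def Spec_hermite_coeffs_py (deg : Int) (out : List Int) : Prop := out = hermite_coeffs_py_alt deg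
instance (deg : Int) (out : List Int) : Decidable (Spec_hermite_coeffs_py deg out) := by unfold Spec_hermite_coeffs_py; infer_instance

-- ===== CLAIM =====
def Claim_equal_hermite_coeffs_py : Prop := ∀ (deg : Int), Dom_hermite_coeffs_py deg → Pre_hermite_coeffs_py deg → Spec_hermite_coeffs_py deg (hermite_coeffs_py deg)

-- ===== LEMMAS AND PROOFS =====

-- Loop invariant: after processing range(2, k+2), the state is (H_k, H_{k+1}).
lemma herm_fold (k : Nat) :
    (PySem.List.pyRange 2 ((k : Int) + 2) 1).foldl
      (fun (st : List Int × List Int) n =>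
        (st.2, List.zipWith (fun a b => 2 * (a - (n - 1) * b)) (0 :: st.2) (st.1 ++ [0, 0])))
      ([1], [0, 2]) = (hermAux k, hermAux (k + 1)) := by
  induction k with
  | zero =>
      rw [show ((0 : Nat) : Int) + 2 = 2 by norm_num, PySem.List.pyRange_one_eq_nil (by norm_num)]
      simp [hermAux]
  | succ m ih =>
      rw [show ((m + 1 : Nat) : Int) + 2 = ((m : Int) + 2) + 1 by push_cast; ring,
        PySem.List.pyRange_one_succ_right (by omega), List.foldl_append, ih]
      simp only [List.foldl_cons, List.foldl_nil]
      have h1 : ((m : Int) + 2) - 1 = (m : Int) + 1 := by ring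
      simp [hermAux, h1]

-- ===== VERDICT =====
theorem hermite_coeffs_py_spec : Claim_equal_hermite_coeffs_py := by
  intro deg _ hpre
  unfold Pre_hermite_coeffs_py at hpre
  unfold Spec_hermite_coeffs_py hermite_coeffs_py hermite_coeffs_py_alt
  by_cases h0 : deg = 0
  · subst h0; simp [hermAux]
  · have hpos : 1 ≤ deg := by omega
    obtain ⟨k, hk⟩ : ∃ k : Nat, deg = (k : Int) + 1 :=
      ⟨(deg - 1).toNat, by omega⟩
    subst hk
    have : ((k : Int) + 1) + 1 = (k : Int) + 2 := by ring
    simp only [this, beq_iff_eq, h0, if_false, herm_fold]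
    congr 1
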